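-- pv_equiv track=rewrite | github.com/fxbin/virtual-intelligent-dev-team | scripts/run_iteration_loop.py | compute_consecutive_non_keep_rounds
-- ===== SOURCE A (Python) =====
-- def compute_consecutive_non_keep_rounds(rounds_run: list[dict[str, object]]) -> int:
--     streak = 0
--     for item in reversed(rounds_run):
--         if not isinstance(item, dict):
--             continue
--         decision = str(item.get("decision", "")).strip()
--         if decision in {"retry", "rollback"}:
--             streak += 1
--             continue
--         break
--     return streak
-- ===== SOURCE B (Python) =====
-- def compute_consecutive_non_keep_rounds(rounds_run: list[dict[str, object]]) -> int:
--     streak = 0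
--     for item in rounds_run:
--         if not isinstance(item, dict):
--             continue
--         decision = str(item.get("decision", "")).strip()
--         streak = streak + 1 if decision in {"retry", "rollback"} else 0
--     return streak
-- ===== Notes on version B (the rewrite author's own statement) =====
-- stated objective: simpler
-- what changed: Single forward pass with a reset accumulator (streak resets to 0 on a non-matching dict) instead of a reversed traversal with an early break.
import Mathlib
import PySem

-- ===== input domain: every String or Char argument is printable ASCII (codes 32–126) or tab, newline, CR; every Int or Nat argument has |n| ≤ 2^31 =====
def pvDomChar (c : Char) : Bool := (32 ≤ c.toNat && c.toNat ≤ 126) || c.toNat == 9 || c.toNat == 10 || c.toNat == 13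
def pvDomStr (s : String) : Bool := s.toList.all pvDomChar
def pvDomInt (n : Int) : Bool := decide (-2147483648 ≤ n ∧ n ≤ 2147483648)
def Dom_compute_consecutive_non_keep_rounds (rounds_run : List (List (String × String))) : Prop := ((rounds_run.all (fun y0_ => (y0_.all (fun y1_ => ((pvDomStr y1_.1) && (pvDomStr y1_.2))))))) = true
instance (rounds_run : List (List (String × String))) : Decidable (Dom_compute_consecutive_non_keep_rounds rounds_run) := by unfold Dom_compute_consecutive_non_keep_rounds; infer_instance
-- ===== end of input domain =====

-- B replaces A's reversed traversal with early break by a single forward pass with a reset accumulator (simpler decomposition, same cost).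
-- In the ported type every item is a dict, so Python's 'if not isinstance(item, dict): continue' never fires; both ports omit it.

-- ===== PORT A =====
-- decision = str(item.get("decision", "")).strip(); decision in {"retry", "rollback"}
def pvDecisionMatches (item : List (String × String)) : Bool :=
  let decision := PySem.Str.strip ((PySem.Dict.mk item).getD "decision" "")
  decision == "retry" || decision == "rollback"

-- the 'for item in reversed(rounds_run)' loop with its break, as structural recursion over the reversed list
def pvLoopA : List (List (String × String)) → Int
  | [] => 0
  | item :: rest => if pvDecisionMatches item then 1 + pvLoopA rest else 0

def compute_consecutive_non_keep_rounds (rounds_run : List (List (String × String))) : Int :=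
  pvLoopA rounds_run.reverse

-- ===== PORT B =====
def compute_consecutive_non_keep_rounds_alt (rounds_run : List (List (String × String))) : Int :=
  rounds_run.foldl (fun streak item => if pvDecisionMatches item then streak + 1 else 0) 0

-- ===== PRECONDITION & SPEC =====
def Spec_compute_consecutive_non_keep_rounds (rounds_run : List (List (String × String))) (out : Int) : Prop := out = compute_consecutive_non_keep_rounds_alt rounds_run
instance (rounds_run : List (List (String × String))) (out : Int) : Decidable (Spec_compute_consecutive_non_keep_rounds rounds_run out) := by unfold Spec_compute_consecutive_non_keep_rounds; infer_instance

-- ===== CLAIM (what is proved, stated in full; the proofs are below) =====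
def Claim_equal_compute_consecutive_non_keep_rounds : Prop := ∀ (rounds_run : List (List (String × String))), Dom_compute_consecutive_non_keep_rounds rounds_run → Spec_compute_consecutive_non_keep_rounds rounds_run (compute_consecutive_non_keep_rounds rounds_run)

-- ===== LEMMAS AND PROOFS =====

-- ===== VERDICT (by name: the statement is the Claim_ definition above) =====
lemma pvLoopA_reverse_eq_foldl (l : List (List (String × String))) :
    pvLoopA l.reverse = l.foldl (fun streak item => if pvDecisionMatches item then streak + 1 else 0) 0 := by
  induction l using List.reverseRecOn with
  | nil => rfl
  | append_singleton l x ih =>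
    rw [List.reverse_append, List.foldl_append]
    simp only [List.reverse_singleton, List.singleton_append, List.foldl_cons, List.foldl_nil, pvLoopA]
    rw [ih]
    split_ifs <;> omega

theorem compute_consecutive_non_keep_rounds_spec : Claim_equal_compute_consecutive_non_keep_rounds := by
  intro rounds_run _
  unfold Spec_compute_consecutive_non_keep_rounds compute_consecutive_non_keep_rounds compute_consecutive_non_keep_rounds_alt
  exact pvLoopA_reverse_eq_foldl rounds_run
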